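-- pv_equiv track=rewrite | github.com/bonlaw859/python_projects | dna.py | count_nuc
-- ===== SOURCE A (Python) =====
-- UNIQUE_NUC = 4
--
-- def count_nuc(sequence):
--
--     #set list based on unique nucleotides constant
--     nuc_count = [0] * (UNIQUE_NUC + 1)
--
--     #loop to count each item based on index of list
--     for char in sequence:
--         if char == 'A':
--             nuc_count[0] += 1
--         elif char == 'C':
--             nuc_count[1] += 1
--         elif char == 'G':
--             nuc_count[2] += 1
--         elif char == 'T':
--             nuc_count[3] += 1
--         elif char == '-':
--             nuc_count[4] += 1
--
--     #return count of items
--     return nuc_count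
-- ===== SOURCE B (Python) =====
-- UNIQUE_NUC = 4
--
-- def count_nuc(sequence):
--     # one independent str.count scan per nucleotide symbol (no accumulator pass)
--     return [sequence.count(nuc) for nuc in "ACGT-"]
-- ===== Notes on version B (the rewrite author's own statement) =====
-- stated objective: faster
-- what changed: B drops A's single Python-level pass with a 5-slot accumulator updated by an if/elif chain and instead performs five independent built-in str.count scans, one per nucleotide symbol, shaping the result with a comprehension.
import Mathlib
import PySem

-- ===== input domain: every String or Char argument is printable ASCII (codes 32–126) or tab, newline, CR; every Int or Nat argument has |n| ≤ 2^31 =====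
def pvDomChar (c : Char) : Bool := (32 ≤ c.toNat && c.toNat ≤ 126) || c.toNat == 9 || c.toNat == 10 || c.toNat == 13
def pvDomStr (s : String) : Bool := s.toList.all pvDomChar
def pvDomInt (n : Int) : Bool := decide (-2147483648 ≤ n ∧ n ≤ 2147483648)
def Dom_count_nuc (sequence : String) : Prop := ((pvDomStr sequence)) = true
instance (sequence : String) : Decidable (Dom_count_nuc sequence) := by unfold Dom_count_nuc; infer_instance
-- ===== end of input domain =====

-- B replaces A's single pass (5-slot accumulator updated by an if/elif chain) with five
-- independent built-in str.count scans, one per nucleotide symbol (objective: faster, constant-factor: C-level scans).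

-- ===== PORT A =====
-- A's loop body: the elif chain updating the 5-slot count list in place.
def countNucStep (nc : List Int) (char : Char) : List Int :=
  if char == 'A' then nc.set 0 (nc.getD 0 0 + 1)
  else if char == 'C' then nc.set 1 (nc.getD 1 0 + 1)
  else if char == 'G' then nc.set 2 (nc.getD 2 0 + 1)
  else if char == 'T' then nc.set 3 (nc.getD 3 0 + 1)
  else if char == '-' then nc.set 4 (nc.getD 4 0 + 1)
  else nc

def count_nuc (sequence : String) : List Int :=
  sequence.toList.foldl countNucStep (List.replicate (4 + 1) 0)

-- ===== PORT B =====
def count_nuc_alt (sequence : String) : List Int :=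
  "ACGT-".toList.map (fun nuc => (PySem.Str.count sequence (String.ofList [nuc]) : Int))

-- ===== PRECONDITION & SPEC =====
def Spec_count_nuc (sequence : String) (out : List Int) : Prop := out = count_nuc_alt sequence
instance (sequence : String) (out : List Int) : Decidable (Spec_count_nuc sequence out) := by unfold Spec_count_nuc; infer_instance

-- ===== CLAIM (what is proved, stated in full; the proofs are below) =====
def Claim_equal_count_nuc : Prop := ∀ (sequence : String), Dom_count_nuc sequence → Spec_count_nuc sequence (count_nuc sequence)

-- ===== LEMMAS AND PROOFS =====
-- A's loop computes the per-symbol character counts.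
lemma countNuc_loop (l : List Char) (a c g t d : Int) :
    l.foldl countNucStep [a, c, g, t, d] =
      [a + l.count 'A', c + l.count 'C', g + l.count 'G', t + l.count 'T', d + l.count '-'] := by
  induction l generalizing a c g t d with
  | nil => simp
  | cons x xs ih =>
    simp only [List.foldl_cons, countNucStep]
    split_ifs with h1 h2 h3 h4 h5 <;> simp_all [List.count_cons] <;> ring

-- Python's s.count(sub) for a single-character sub is the character count.
lemma count_go_single (c : Char) (l : List Char) (fuel acc : Nat) (h : l.length ≤ fuel) :
    PySem.Chars.count.go [c] fuel l acc = acc + l.count c := by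
  induction l generalizing fuel acc with
  | nil => cases fuel <;> simp [PySem.Chars.count.go]
  | cons x xs ih =>
    cases fuel with
    | zero => simp at h
    | succ n =>
      simp only [PySem.Chars.count.go]
      by_cases hx : x = c
      · subst hx
        simp [List.isPrefixOf, ih _ _ (by simpa using h)]
        ring
      · simp [List.isPrefixOf, Ne.symm hx, hx,
              ih _ _ (by simpa using Nat.le_of_succ_le_succ h)]

lemma chars_count_single (l : List Char) (c : Char) :
    PySem.Chars.count l [c] = l.count c := by
  simp [PySem.Chars.count, count_go_single c l l.length 0 le_rfl]

-- ===== VERDICT (by name: the statement is the Claim_ definition above) =====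
theorem count_nuc_spec : Claim_equal_count_nuc := by
  intro s _
  show count_nuc s = count_nuc_alt s
  unfold count_nuc count_nuc_alt
  have hl : ("ACGT-".toList) = ['A', 'C', 'G', 'T', '-'] := by decide
  rw [hl]
  simp [List.replicate, countNuc_loop, chars_count_single]
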